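-- pv_equiv track=rewrite | github.com/NB-Dragon/AdvancedDownloader | management/mission/ActionConfigReceiver.py | _pop_match_section
-- ===== SOURCE A (Python) =====
-- def _pop_match_section(position, section_list):
--     for section_item in section_list:
--         if section_item[0] == position:
--             section_list.remove(section_item)
--             return section_item
--     for section_item in section_list:
--         if section_item[0] < position <= section_item[1]:
--             section_list.remove(section_item)
--             section_list.append([section_item[0], position - 1])
--             return [position, section_item[1]]
-- ===== SOURCE B (Python) =====
-- def _pop_match_section(position, section_list):
--     candidate = None
--     for item in section_list:
--         if item[0] == position:
--             section_list.remove(item)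
--             return item
--         if candidate is None and item[0] < position <= item[1]:
--             candidate = item
--     if candidate is not None:
--         section_list.remove(candidate)
--         section_list.append([candidate[0], position - 1])
--         return [position, candidate[1]]
-- ===== Notes on version B (the rewrite author's own statement) =====
-- stated objective: alternative
-- what changed: Replaces A's two sequential scans (exact-start scan, then containment scan) by a single pass that returns immediately on an exact start match and merely records the first containment candidate, acting on it only after the scan finishes.
-- outside the precondition, e.g. on _pop_match_section(1, [[1, 2], []]): A returns [1, 2], B returns [1, 2]; on _pop_match_section(5, [[3], [5, 9]]): A returns [5, 9], B raises IndexError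
import Mathlib
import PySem

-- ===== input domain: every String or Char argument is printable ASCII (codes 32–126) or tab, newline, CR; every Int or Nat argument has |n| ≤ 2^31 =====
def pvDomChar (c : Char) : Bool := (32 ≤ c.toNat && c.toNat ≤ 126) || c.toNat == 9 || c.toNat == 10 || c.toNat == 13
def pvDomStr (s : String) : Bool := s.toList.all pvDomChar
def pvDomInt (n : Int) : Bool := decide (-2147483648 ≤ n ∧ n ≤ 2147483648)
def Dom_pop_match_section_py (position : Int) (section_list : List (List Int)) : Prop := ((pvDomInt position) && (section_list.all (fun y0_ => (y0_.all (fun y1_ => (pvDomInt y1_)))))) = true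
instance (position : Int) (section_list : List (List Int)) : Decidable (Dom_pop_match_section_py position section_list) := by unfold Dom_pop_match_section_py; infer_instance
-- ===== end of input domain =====

-- B replaces A's two sequential scans by a single pass that returns on an exact start match and
-- records the first containment candidate, splitting it only after the scan (same cost, one pass).
-- Both A and B mutate section_list; on inputs inside Pre_ their mutations coincide as well, but the
-- equivalence proved here is about the RETURN value only.


-- ===== PORT A =====
-- first loop of A: some (some s) = "return s", some none = IndexError (outside Pre_), none = loop fell through
def pvA_find1 (position : Int) : List (List Int) → Option (Option (List Int))
  | [] => none
  | s :: rest =>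
    match PySem.List.pyGet? s 0 with
    | none => some none
    | some a => if a = position then some (some s) else pvA_find1 position rest

-- second loop of A (chained comparison: s[1] is evaluated only when s[0] < position)
def pvA_loop2 (position : Int) : List (List Int) → Option (List Int)
  | [] => none
  | s :: rest =>
    match PySem.List.pyGet? s 0 with
    | none => none
    | some a =>
      if a < position then
        match PySem.List.pyGet? s 1 with
        | none => none
        | some b => if position ≤ b then some [position, b] else pvA_loop2 position rest
      else pvA_loop2 position rest

def pop_match_section_py (position : Int) (section_list : List (List Int)) : Option (List Int) :=
  match pvA_find1 position section_list with
  | some r => r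
  | none => pvA_loop2 position section_list

-- ===== PORT B =====
-- after B's single pass: act on the recorded containment candidate, if any
def pvB_finish (position : Int) : Option (List Int) → Option (List Int)
  | none => none
  | some c =>
    match PySem.List.pyGet? c 1 with
    | none => none
    | some b => some [position, b]

def pvB_loop (position : Int) (cand : Option (List Int)) : List (List Int) → Option (List Int)
  | [] => pvB_finish position cand
  | s :: rest =>
    match PySem.List.pyGet? s 0 with
    | none => none
    | some a =>
      if a = position then some s
      else
        match cand with
        | some _ => pvB_loop position cand rest
        | none =>
          if a < position then
            match PySem.List.pyGet? s 1 with
            | none => none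
            | some b =>
              if position ≤ b then pvB_loop position (some s) rest
              else pvB_loop position none rest
          else pvB_loop position none rest

def pop_match_section_py_alt (position : Int) (section_list : List (List Int)) : Option (List Int) :=
  pvB_loop position none section_list

-- ===== PRECONDITION & SPEC =====
-- Pre_ requires every section to be a [start, end] pair (length ≥ 2): on malformed shorter sections
-- A's two scans and B's single scan can raise IndexError at different points, and any value A still
-- returns there (by returning before reaching the malformed section) is an accident of scan order.
def Pre_pop_match_section_py (position : Int) (section_list : List (List Int)) : Prop :=
  ∀ s ∈ section_list, 2 ≤ s.length
instance (position : Int) (section_list : List (List Int)) : Decidable (Pre_pop_match_section_py position section_list) := by unfold Pre_pop_match_section_py; infer_instance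

def pvWitness_pop_match_section_py : Int × List (List Int) := (5, [[1, 4], [5, 9]])

def Spec_pop_match_section_py (position : Int) (section_list : List (List Int)) (out : Option (List Int)) : Prop := out = pop_match_section_py_alt position section_list
instance (position : Int) (section_list : List (List Int)) (out : Option (List Int)) : Decidable (Spec_pop_match_section_py position section_list out) := by unfold Spec_pop_match_section_py; infer_instance

-- ===== CLAIM (what is proved, stated in full; the proofs are below) =====
def Claim_equal_pop_match_section_py : Prop := ∀ (position : Int) (section_list : List (List Int)), Dom_pop_match_section_py position section_list → Pre_pop_match_section_py position section_list → Spec_pop_match_section_py position section_list (pop_match_section_py position section_list)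

-- ===== LEMMAS AND PROOFS =====

-- single-pass invariant: B's loop with candidate `cand` equals "if A's first loop would still return
-- from the remaining list, that result; otherwise the candidate action (or A's second loop if none)"
lemma pvB_inv (position : Int) (l : List (List Int)) (cand : Option (List Int))
    (h : ∀ s ∈ l, 2 ≤ s.length) :
    pvB_loop position cand l =
      match pvA_find1 position l with
      | some r => r
      | none =>
        match cand with
        | some _ => pvB_finish position cand
        | none => pvA_loop2 position l := by
  induction l generalizing cand with
  | nil => cases cand <;> simp [pvB_loop, pvA_find1, pvA_loop2, pvB_finish]
  | cons s rest ih =>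
    obtain ⟨x, s1, hs⟩ : ∃ x s1, s = x :: s1 := by
      cases s with
      | nil => exact absurd (h [] (by simp)) (by simp)
      | cons x s1 => exact ⟨x, s1, rfl⟩
    obtain ⟨y, t, ht⟩ : ∃ y t, s1 = y :: t := by
      cases s1 with
      | nil => exact absurd (h s (by simp)) (by simp [hs])
      | cons y t => exact ⟨y, t, rfl⟩
    subst hs ht
    have hrest : ∀ u ∈ rest, 2 ≤ u.length := fun u hu => h u (by simp [hu])
    have h0 : PySem.List.pyGet? (x :: y :: t) (0 : Int) = some x := by simp [pysem]
    have h1 : PySem.List.pyGet? (x :: y :: t) (1 : Int) = some y := by simp [pysem]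
    by_cases hx : x = position
    · simp [pvB_loop, pvA_find1, hx]
    · cases cand with
      | some c =>
        simp only [pvB_loop, pvA_find1, h0, if_neg hx]
        rw [ih (some c) hrest]
      | none =>
        by_cases hlt : x < position
        · by_cases hle : position ≤ y
          · simp only [pvB_loop, pvA_find1, pvA_loop2, h0, h1, if_neg hx, if_pos hlt, if_pos hle]
            rw [ih (some (x :: y :: t)) hrest]
            cases hf : pvA_find1 position rest with
            | some r => simp
            | none => simp [pvB_finish]
          · simp only [pvB_loop, pvA_find1, pvA_loop2, h0, h1, if_neg hx, if_pos hlt, if_neg hle]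
            rw [ih none hrest]
        · simp only [pvB_loop, pvA_find1, pvA_loop2, h0, if_neg hx, if_neg hlt]
          rw [ih none hrest]

-- ===== VERDICT (by name: the statement is the Claim_ definition above) =====
theorem pop_match_section_py_spec : Claim_equal_pop_match_section_py := by
  intro position section_list _ hpre
  unfold Spec_pop_match_section_py pop_match_section_py pop_match_section_py_alt
  rw [pvB_inv position section_list none hpre]
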